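-- pv_equiv track=rewrite | github.com/gourav-sharma1857/cipher-spry-backend | patterns.py | vowel_forward_2_consonant_backward_1
-- ===== SOURCE A (Python) =====
-- MOD_26 = 26 # Constant for modulo 26, used for wrapping around the alphabet (A-Z)
--
-- ASCII_A_UPPER = ord('A') # ASCII value of 'A' (65), used as a base for character-to-index conversion
--
-- VOWELS = "AEIOU" # String of uppercase vowels
--
-- def is_vowel(char: str) -> bool: # Function to check if a character is a vowel
--     return char.upper() in VOWELS # Convert char to uppercase and check if it's in the VOWELS string
--
-- def is_consonant(char: str) -> bool: # Function to check if a character is a consonant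
--     return char.isalpha() and not is_vowel(char) # Check if it's an alphabet character AND not a vowel
--
-- def shift_char(char: str, shift: int) -> str: # Function to shift a character by a given amount (Caesar cipher style)
--     if 'A' <= char <= 'Z': # Check if the character is an uppercase letter
--         # Convert char to 0-25 index, add shift, apply modulo 26, handle negative results, convert back to ASCII char
--         return chr(((ord(char) - ASCII_A_UPPER + shift) % MOD_26 + MOD_26) % MOD_26 + ASCII_A_UPPER)
--     return char # Return non-alphabetic characters unchanged
--
-- def vowel_forward_2_consonant_backward_1(word: str) -> str: # Pattern: shifts vowels forward by 2, consonants backward by 1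
--     transformed = [] # Initialize an empty list
--     for char in word: # Iterate through each character
--         if is_vowel(char): # If it's a vowel
--             transformed.append(shift_char(char, 2)) # Shift forward by 2
--         elif is_consonant(char): # If it's a consonant
--             transformed.append(shift_char(char, -1)) # Shift backward by 1
--         else: # If not a letter, append unchanged
--             transformed.append(char)
--     return "".join(transformed) # Join the list of characters
-- ===== SOURCE B (Python) =====
-- _TABLE = str.maketrans({chr(65 + i): chr((i + (2 if chr(65 + i) in "AEIOU" else -1)) % 26 + 65)
--                         for i in range(26)})
--
-- def vowel_forward_2_consonant_backward_1(word: str) -> str: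
--     return word.translate(_TABLE)
-- ===== Notes on version B (the rewrite author's own statement) =====
-- stated objective: faster
-- what changed: Replaces the per-character vowel/consonant branching loop with a 26-entry translation table built once via str.maketrans and a single C-level str.translate pass.
import Mathlib
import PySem

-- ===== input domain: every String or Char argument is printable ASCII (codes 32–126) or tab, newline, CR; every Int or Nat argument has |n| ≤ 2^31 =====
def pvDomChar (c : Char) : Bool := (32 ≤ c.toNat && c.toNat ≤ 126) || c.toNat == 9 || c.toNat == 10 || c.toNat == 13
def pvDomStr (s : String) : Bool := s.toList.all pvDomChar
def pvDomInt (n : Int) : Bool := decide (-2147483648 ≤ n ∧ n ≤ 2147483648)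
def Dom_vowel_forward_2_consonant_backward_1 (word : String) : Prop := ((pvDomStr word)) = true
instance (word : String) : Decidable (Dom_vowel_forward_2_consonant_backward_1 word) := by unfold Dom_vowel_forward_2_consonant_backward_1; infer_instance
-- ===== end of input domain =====

-- B builds a 26-entry translation table once and translates in one pass; A branches per character.

-- ===== PORT A =====
-- VOWELS = "AEIOU"
def pvVowels : List Char := ['A', 'E', 'I', 'O', 'U']

-- is_vowel: char.upper() in VOWELS
def pvIsVowel (c : Char) : Bool := pvVowels.contains (PySem.Chars.upperChar c)

-- is_consonant: char.isalpha() and not is_vowel(char)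
def pvIsConsonant (c : Char) : Bool := PySem.Chars.isalpha c && !(pvIsVowel c)

-- shift_char: shift uppercase letters mod 26, others unchanged
def pvShiftChar (c : Char) (shift : Int) : Char :=
  if 'A' ≤ c ∧ c ≤ 'Z' then
    Char.ofNat ((PySem.Int.mod (PySem.Int.mod ((c.toNat : Int) - 65 + shift) 26 + 26) 26).toNat + 65)
  else c

def vowel_forward_2_consonant_backward_1 (word : String) : String :=
  String.mk (word.toList.foldl (fun acc c =>
    if pvIsVowel c then acc ++ [pvShiftChar c 2]
    else if pvIsConsonant c then acc ++ [pvShiftChar c (-1)]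
    else acc ++ [c]) [])

-- ===== PORT B =====
-- the translation table: each uppercase letter to its image (vowels +2, consonants -1, mod 26)
def pvTable : PySem.Dict Char Char :=
  (PySem.List.pyRange 0 26 1).foldl (fun d i =>
    let ch := Char.ofNat (65 + i.toNat)
    let delta : Int := if pvVowels.contains ch then 2 else -1
    d.insert ch (Char.ofNat ((PySem.Int.mod (i + delta) 26).toNat + 65))) PySem.Dict.empty

def vowel_forward_2_consonant_backward_1_alt (word : String) : String :=
  String.mk (word.toList.map (fun c => pvTable.getD c c))

-- ===== PRECONDITION & SPEC =====
def Spec_vowel_forward_2_consonant_backward_1 (word : String) (out : String) : Prop := out = vowel_forward_2_consonant_backward_1_alt word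
instance (word : String) (out : String) : Decidable (Spec_vowel_forward_2_consonant_backward_1 word out) := by unfold Spec_vowel_forward_2_consonant_backward_1; infer_instance

-- ===== CLAIM (what is proved, stated in full; the proofs are below) =====
def Claim_equal_vowel_forward_2_consonant_backward_1 : Prop := ∀ (word : String), Dom_vowel_forward_2_consonant_backward_1 word → Spec_vowel_forward_2_consonant_backward_1 word (vowel_forward_2_consonant_backward_1 word)

-- ===== LEMMAS AND PROOFS =====

-- A's per-character transformation
def pvAChar (c : Char) : Char :=
  if pvIsVowel c then pvShiftChar c 2
  else if pvIsConsonant c then pvShiftChar c (-1)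
  else c

-- the per-character agreement, enumerated over the 128 ASCII codes
set_option maxRecDepth 4000 in
lemma pvCharAgree_enum : ∀ n ∈ List.range 128,
    (pvDomChar (Char.ofNat n) → pvAChar (Char.ofNat n) = pvTable.getD (Char.ofNat n) (Char.ofNat n)) := by
  decide

lemma pvCharAgree (c : Char) (h : pvDomChar c = true) :
    pvAChar c = pvTable.getD c c := by
  have hlt : c.toNat < 128 := by
    simp [pvDomChar] at h
    omega
  have := pvCharAgree_enum c.toNat (List.mem_range.mpr hlt)
  rw [Char.ofNat_toNat] at this
  exact this h

-- ===== VERDICT (by name: the statement is the Claim_ definition above) =====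
theorem vowel_forward_2_consonant_backward_1_spec : Claim_equal_vowel_forward_2_consonant_backward_1 := by
  intro word hdom
  unfold Spec_vowel_forward_2_consonant_backward_1
  unfold vowel_forward_2_consonant_backward_1 vowel_forward_2_consonant_backward_1_alt
  have hfold : word.toList.foldl (fun acc c =>
      if pvIsVowel c then acc ++ [pvShiftChar c 2]
      else if pvIsConsonant c then acc ++ [pvShiftChar c (-1)]
      else acc ++ [c]) [] = word.toList.map pvAChar := by
    have : ∀ (l : List Char) (acc : List Char), l.foldl (fun acc c =>
        if pvIsVowel c then acc ++ [pvShiftChar c 2]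
        else if pvIsConsonant c then acc ++ [pvShiftChar c (-1)]
        else acc ++ [c]) acc = acc ++ l.map pvAChar := by
      intro l
      induction l with
      | nil => simp
      | cons c t ih =>
        intro acc
        simp only [List.foldl_cons, List.map_cons, ih, pvAChar]
        split_ifs <;> simp
    simpa using this word.toList []
  rw [hfold]
  congr 1
  apply List.map_congr_left
  intro c hc
  have hd : pvDomChar c = true := by
    have := (List.all_eq_true.mp hdom) c hc
    simpa using this
  exact pvCharAgree c hd
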